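-- pv_equiv track=rewrite | github.com/kaushal4/dsa | 2255-minimum-swaps-to-group-all-1s-together-ii/minimum-swaps-to-group-all-1s-together-ii.py | minArrayOf
-- ===== SOURCE A (Python) =====
-- def minArrayOf(nums, n):
--     cur_sum = 0
--     low = 0
--     high = n - 1
--     cur_sum = sum(nums[low: high + 1])
--     min_sum = cur_sum
--     while high < len(nums) - 1:
--         cur_sum = cur_sum - nums[low] + nums[high + 1]
--         high += 1
--         low += 1
--         min_sum = min(min_sum, cur_sum)
--     return min_sum
-- ===== SOURCE B (Python) =====
-- def minArrayOf(nums, n):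
--     m = min(n, len(nums))
--     prefix = [0]
--     for x in nums:
--         prefix.append(prefix[-1] + x)
--     best = prefix[m] - prefix[0]
--     for i in range(1, len(nums) - m + 1):
--         best = min(best, prefix[i + m] - prefix[i])
--     return best
-- ===== Notes on version B (the rewrite author's own statement) =====
-- stated objective: alternative
-- what changed: Replaces A's sliding-window add/subtract update loop by a prefix-sum array: each window sum is computed as P[i+n]-P[i], with the width clamped to len(nums) so no separate edge loop is needed.
import Mathlib
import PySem

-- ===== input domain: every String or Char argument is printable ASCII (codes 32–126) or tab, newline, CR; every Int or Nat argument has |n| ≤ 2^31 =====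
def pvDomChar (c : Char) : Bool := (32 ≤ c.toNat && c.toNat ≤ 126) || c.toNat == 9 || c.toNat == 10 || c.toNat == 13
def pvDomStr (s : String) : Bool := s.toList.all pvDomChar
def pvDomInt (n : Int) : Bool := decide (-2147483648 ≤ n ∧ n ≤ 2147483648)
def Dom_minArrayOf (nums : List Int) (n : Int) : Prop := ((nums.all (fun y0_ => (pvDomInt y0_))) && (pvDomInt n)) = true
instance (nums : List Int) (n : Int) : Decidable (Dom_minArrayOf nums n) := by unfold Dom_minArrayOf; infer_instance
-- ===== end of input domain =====

-- B replaces A's sliding-window add/subtract update loop by a prefix-sum array (each window sum is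
-- P[i+n]-P[i], with the width clamped to len(nums)); same O(len) cost, different decomposition.

-- ===== PORT A =====
-- A's while loop; fuel = number of remaining iterations (high increases by exactly 1 per iteration,
-- so (len(nums)-1-high).toNat at entry counts the iterations of 'while high < len(nums)-1').
-- Indexing uses pyGetD: under Pre_ (0 ≤ n) every access nums[low], nums[high+1] is in range.
def minArrayOfLoop (nums : List Int) (low high curSum minSum : Int) : Nat → Int
  | 0 => minSum
  | Nat.succ fuel =>
    let curSum' := curSum - PySem.List.pyGetD nums low 0 + PySem.List.pyGetD nums (high + 1) 0
    minArrayOfLoop nums (low + 1) (high + 1) curSum' (min minSum curSum') fuel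

def minArrayOf (nums : List Int) (n : Int) : Int :=
  let low : Int := 0
  let high : Int := n - 1
  let curSum := (PySem.List.slice nums (some low) (some (high + 1))).sum
  let minSum := curSum
  minArrayOfLoop nums low high curSum minSum (((nums.length : Int) - 1 - high).toNat)

-- ===== PORT B =====
def minArrayOf_alt (nums : List Int) (n : Int) : Int :=
  let m := min n ((nums.length : Int))
  let pfx := nums.foldl (fun p x => p ++ [PySem.List.pyGetD p (-1) 0 + x]) ([0] : List Int)
  let best := PySem.List.pyGetD pfx m 0 - PySem.List.pyGetD pfx 0 0
  (PySem.List.pyRange 1 ((nums.length : Int) - m + 1) 1).foldl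
    (fun best i => min best (PySem.List.pyGetD pfx (i + m) 0 - PySem.List.pyGetD pfx i 0)) best

-- ===== PRECONDITION & SPEC =====
-- On every n < 0 the Python A raises IndexError (its loop walks low past the end of nums); Pre_ excludes exactly those inputs.
def Pre_minArrayOf (nums : List Int) (n : Int) : Prop := 0 ≤ n
instance (nums : List Int) (n : Int) : Decidable (Pre_minArrayOf nums n) := by unfold Pre_minArrayOf; infer_instance
def pvWitness_minArrayOf : List Int × Int := ([1, 0, 1, 0, 1], 2)

def Spec_minArrayOf (nums : List Int) (n : Int) (out : Int) : Prop := out = minArrayOf_alt nums n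
instance (nums : List Int) (n : Int) (out : Int) : Decidable (Spec_minArrayOf nums n out) := by unfold Spec_minArrayOf; infer_instance

-- ===== CLAIM (what is proved, stated in full; the proofs are below) =====
def Claim_equal_minArrayOf : Prop := ∀ (nums : List Int) (n : Int), Dom_minArrayOf nums n → Pre_minArrayOf nums n → Spec_minArrayOf nums n (minArrayOf nums n)

-- ===== LEMMAS AND PROOFS =====

-- running partial sums starting from c (the tail B's prefix list appends after the initial 0)
def psums (c : Int) : List Int → List Int
  | [] => []
  | x :: xs => (c + x) :: psums (c + x) xs

-- sum of the window of nums covering positions i+1 .. i+N, written via take-sums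
def winW (nums : List Int) (N i : Nat) : Int :=
  (nums.take (i + N + 1)).sum - (nums.take (i + 1)).sum

theorem foldl_prefix_eq (xs : List Int) : ∀ (q : List Int) (c : Int),
    xs.foldl (fun p x => p ++ [PySem.List.pyGetD p (-1) 0 + x]) (q ++ [c])
      = (q ++ [c]) ++ psums c xs := by
  induction xs with
  | nil => intro q c; simp [psums]
  | cons x xs ih =>
    intro q c
    simp only [List.foldl_cons, PySem.List.pyGetD_neg_one_append_singleton, psums]
    have := ih (q ++ [c]) (c + x)
    simpa using this

theorem psums_getD (xs : List Int) : ∀ (c : Int) (k : Nat), k < xs.length →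
    (psums c xs).getD k 0 = c + (xs.take (k + 1)).sum := by
  induction xs with
  | nil => intro c k h; simp at h
  | cons x xs ih =>
    intro c k h
    cases k with
    | zero => simp [psums]
    | succ k =>
      simp only [psums, List.getD_cons_succ, List.take_succ_cons, List.sum_cons]
      rw [ih (c + x) k (by simpa using h)]
      ring

-- B's prefix list indexed at k ≤ len gives the sum of the first k elements
theorem prefix_getD (nums : List Int) (k : Nat) (hk : k ≤ nums.length) :
    (nums.foldl (fun p x => p ++ [PySem.List.pyGetD p (-1) 0 + x]) ([0] : List Int)).getD k 0
      = (nums.take k).sum := by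
  have h := foldl_prefix_eq nums [] 0
  simp only [List.nil_append] at h
  rw [h]
  cases k with
  | zero => simp
  | succ k =>
    simp only [List.singleton_append, List.getD_cons_succ]
    rw [psums_getD nums 0 k (by omega)]
    simp

theorem sum_take_succ (nums : List Int) (k : Nat) (h : k < nums.length) :
    (nums.take (k + 1)).sum = (nums.take k).sum + nums.getD k 0 := by
  rw [List.sum_take_succ nums k h, List.getD_eq_getElem nums 0 h]

-- A's while loop computes the running minimum over the remaining fuel windows
theorem loop_spec (nums : List Int) (N : Nat) : ∀ (fuel lo : Nat) (acc : Int),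
    lo + N + fuel = nums.length →
    minArrayOfLoop nums (lo : Int) ((lo : Int) + (N : Int) - 1)
        ((nums.take (lo + N)).sum - (nums.take lo).sum) acc fuel
      = (List.range fuel).foldl (fun b j => min b (winW nums N (lo + j))) acc := by
  intro fuel
  induction fuel with
  | zero => intro lo acc h; simp [minArrayOfLoop]
  | succ fuel ih =>
    intro lo acc h
    have hlo : lo < nums.length := by omega
    have hloN : lo + N < nums.length := by omega
    simp only [minArrayOfLoop]
    have e1 : PySem.List.pyGetD nums (lo : Int) 0 = nums.getD lo 0 :=
      PySem.List.pyGetD_natCast nums lo 0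
    have e2 : PySem.List.pyGetD nums ((lo : Int) + (N : Int) - 1 + 1) 0 = nums.getD (lo + N) 0 := by
      rw [show (lo : Int) + (N : Int) - 1 + 1 = ((lo + N : Nat) : Int) from by push_cast; ring]
      exact PySem.List.pyGetD_natCast nums (lo + N) 0
    rw [e1, e2]
    have ecur : (nums.take (lo + N)).sum - (nums.take lo).sum - nums.getD lo 0 + nums.getD (lo + N) 0
        = (nums.take ((lo + 1) + N)).sum - (nums.take (lo + 1)).sum := by
      have s1 := sum_take_succ nums lo hlo
      have s2 := sum_take_succ nums (lo + N) hloN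
      rw [show (lo + 1) + N = (lo + N) + 1 from by omega, s1, s2]
      ring
    rw [ecur]
    rw [show (lo : Int) + 1 = ((lo + 1 : Nat) : Int) from by push_cast; ring,
        show (lo : Int) + (N : Int) - 1 + 1 = ((lo + 1 : Nat) : Int) + (N : Int) - 1 from by push_cast; ring]
    rw [ih (lo + 1) _ (by omega)]
    rw [List.range_succ_eq_map, List.foldl_cons, List.foldl_map]
    have einit : winW nums N lo = (nums.take ((lo + 1) + N)).sum - (nums.take (lo + 1)).sum := by
      unfold winW
      rw [show lo + N + 1 = (lo + 1) + N from by omega]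
    rw [show lo + 0 = lo from by omega, ← einit]
    exact PySem.List.foldl_congr_mem _ _ _ _ (by
      intro acc' j _
      rw [show (lo + 1) + j = lo + j.succ from by omega])

theorem minArrayOf_eq (nums : List Int) (N : Nat) :
    minArrayOf nums (N : Int) = minArrayOf_alt nums (N : Int) := by
  by_cases hNL : N ≤ nums.length
  · -- normal case: the window fits; both sides equal the min over all window sums
    have hcast : ((N : Int)) ≤ (nums.length : Int) := by exact_mod_cast hNL
    have hA : minArrayOf nums (N : Int)
        = (List.range (nums.length - N)).foldl (fun b j => min b (winW nums N j)) ((nums.take N).sum) := by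
      simp only [minArrayOf]
      have hslice : (PySem.List.slice nums (some 0) (some ((N : Int) - 1 + 1))).sum = (nums.take N).sum := by
        rw [show (N : Int) - 1 + 1 = (N : Int) from by ring]
        simp [PySem.List.slice_to_natCast]
      have hfuel : (((nums.length : Int) - 1 - ((N : Int) - 1)).toNat) = nums.length - N := by omega
      rw [hslice, hfuel]
      have := loop_spec nums N (nums.length - N) 0 ((nums.take N).sum) (by omega)
      simpa using this
    have hB : minArrayOf_alt nums (N : Int)
        = (List.range (nums.length - N)).foldl (fun b j => min b (winW nums N j)) ((nums.take N).sum) := by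
      simp only [minArrayOf_alt]
      rw [min_eq_left hcast]
      set P := nums.foldl (fun p x => p ++ [PySem.List.pyGetD p (-1) 0 + x]) ([0] : List Int) with hPdef
      have hP : ∀ k : Nat, k ≤ nums.length → PySem.List.pyGetD P (k : Int) 0 = (nums.take k).sum := by
        intro k hk
        rw [hPdef]
        simp only [PySem.List.pyGetD_natCast]
        exact prefix_getD nums k hk
      have hbest : PySem.List.pyGetD P (N : Int) 0 - PySem.List.pyGetD P 0 0 = (nums.take N).sum := by
        rw [hP N hNL, PySem.List.pyGetD_zero, hPdef, prefix_getD nums 0 (by omega)]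
        simp
      rw [hbest]
      rw [PySem.List.pyRange_one, List.foldl_map]
      rw [show ((nums.length : Int) - (N : Int) + 1 - 1).toNat = nums.length - N from by omega]
      exact PySem.List.foldl_congr_mem _ _ _ _ (by
        intro acc j hj
        have hjlt : j < nums.length - N := by simpa using hj
        rw [show (1 : Int) + (j : Int) + (N : Int) = ((j + N + 1 : Nat) : Int) from by push_cast; ring,
            show (1 : Int) + (j : Int) = ((j + 1 : Nat) : Int) from by push_cast; ring,
            hP (j + N + 1) (by omega), hP (j + 1) (by omega)]
        rfl)
    rw [hA, hB]
  · -- the window is wider than the list: A's loop runs zero times, B's range is empty; both = sum(nums)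
    have hlt : nums.length < N := by omega
    have hA : minArrayOf nums (N : Int) = nums.sum := by
      simp only [minArrayOf]
      rw [show (((nums.length : Int) - 1 - ((N : Int) - 1)).toNat) = 0 from by omega]
      simp only [minArrayOfLoop]
      rw [show (N : Int) - 1 + 1 = (N : Int) from by ring]
      simp [PySem.List.slice_to_natCast, List.take_of_length_le (le_of_lt hlt)]
    have hB : minArrayOf_alt nums (N : Int) = nums.sum := by
      simp only [minArrayOf_alt]
      rw [min_eq_right (le_of_lt (by exact_mod_cast hlt))]
      rw [show ((nums.length : Int) - (nums.length : Int) + 1) = 1 from by ring,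
          PySem.List.pyRange_one_eq_nil (le_refl 1), List.foldl_nil]
      rw [PySem.List.pyGetD_natCast, prefix_getD nums nums.length (le_refl _),
          PySem.List.pyGetD_zero, prefix_getD nums 0 (by omega)]
      simp
    rw [hA, hB]

-- ===== VERDICT (by name: the statement is the Claim_ definition above) =====
theorem minArrayOf_spec : Claim_equal_minArrayOf := by
  intro nums n _ hpre
  unfold Spec_minArrayOf
  obtain ⟨N, rfl⟩ := Int.eq_ofNat_of_zero_le hpre
  exact minArrayOf_eq nums N
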